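-- pv_equiv track=rewrite | github.com/ksayee/programming_assignments | python/CodingExercises/ReplaceOccurencesOfStringNoExtraSpace.py | ReplaceOccurencesOfStringNoExtraSpace
-- ===== SOURCE A (Python) =====
-- def ReplaceOccurencesOfStringNoExtraSpace(str1):
--
--     flg=False
--     for i in range(0,len(str1)):
--         key=str1[i]
--         if key=='A':
--             flg=True
--         elif key=='B':
--             if flg==True:
--                 str1=str1[:i-1]+'C'+' '+str1[i+1:]
--                 flg=False
--         else:
--             flg=False
--     return str1.replace(' ','')
-- ===== SOURCE B (Python) =====
-- def ReplaceOccurencesOfStringNoExtraSpace(str1):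
--     return str1.replace('AB', 'C').replace(' ', '')
-- ===== Notes on version B (the rewrite author's own statement) =====
-- stated objective: faster
-- what changed: Replaces A's index loop, which tracks a flag and rebuilds the whole string by slicing on every 'A'-then-'B' match before a final space-removal pass, with two built-in string replaces: str1.replace('AB','C').replace(' ',''), using that the flag logic is exactly non-overlapping left-to-right 'AB' matching.
import Mathlib
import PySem

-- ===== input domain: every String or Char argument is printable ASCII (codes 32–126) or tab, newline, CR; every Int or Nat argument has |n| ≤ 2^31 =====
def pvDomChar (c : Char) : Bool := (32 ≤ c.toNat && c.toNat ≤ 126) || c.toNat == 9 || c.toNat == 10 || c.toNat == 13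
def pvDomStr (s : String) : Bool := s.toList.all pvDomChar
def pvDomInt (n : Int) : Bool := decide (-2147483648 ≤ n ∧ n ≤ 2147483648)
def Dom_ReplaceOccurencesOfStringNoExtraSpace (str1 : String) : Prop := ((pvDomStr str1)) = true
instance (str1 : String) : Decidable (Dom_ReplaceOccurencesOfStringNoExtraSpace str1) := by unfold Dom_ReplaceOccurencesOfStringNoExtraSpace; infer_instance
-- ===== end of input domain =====

-- B replaces A's index loop (which reslices the whole string on every 'A','B' match and
-- tracks a flag) by two built-in replaces: str1.replace('AB','C').replace(' ','')
-- (objective: faster).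

-- ===== PORT A =====
-- one iteration of A's for-loop: state = (current string as char list, flg)
def pvAstep (st : List Char × Bool) (i : Int) : List Char × Bool :=
  let key := PySem.List.pyGetD st.1 i ' '   -- str1[i]; always in range (the string keeps its length)
  if key = 'A' then (st.1, true)
  else if key = 'B' then
    if st.2 = true then
      -- str1 = str1[:i-1] + 'C' + ' ' + str1[i+1:]
      (PySem.List.slice st.1 none (some (i - 1)) ++ ['C'] ++ [' '] ++
         PySem.List.slice st.1 (some (i + 1)) none, false)
    else st
  else (st.1, false)

def ReplaceOccurencesOfStringNoExtraSpace (str1 : String) : String :=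
  let res := (PySem.List.pyRange 0 (PySem.Str.len str1) 1).foldl pvAstep (str1.toList, false)
  PySem.Str.replace (String.ofList res.1) " " ""   -- str1.replace(' ','')

-- ===== PORT B =====
def ReplaceOccurencesOfStringNoExtraSpace_alt (str1 : String) : String :=
  PySem.Str.replace (PySem.Str.replace str1 "AB" "C") " " ""


-- ===== PRECONDITION & SPEC =====
def Spec_ReplaceOccurencesOfStringNoExtraSpace (str1 : String) (out : String) : Prop := out = ReplaceOccurencesOfStringNoExtraSpace_alt str1
instance (str1 : String) (out : String) : Decidable (Spec_ReplaceOccurencesOfStringNoExtraSpace str1 out) := by unfold Spec_ReplaceOccurencesOfStringNoExtraSpace; infer_instance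

-- ===== CLAIM (what is proved, stated in full; the proofs are below) =====
def Claim_equal_ReplaceOccurencesOfStringNoExtraSpace : Prop := ∀ (str1 : String), Dom_ReplaceOccurencesOfStringNoExtraSpace str1 → Spec_ReplaceOccurencesOfStringNoExtraSpace str1 (ReplaceOccurencesOfStringNoExtraSpace str1)

-- ===== LEMMAS AND PROOFS =====

-- intermediate single pass: out = accumulated output, prevA = (previous char was an unconsumed 'A')
def pvBgo : List Char → List Char → Bool → List Char
  | [], out, _ => out
  | c :: rest, out, prevA =>
    if c = 'B' ∧ prevA = true then pvBgo rest (out.dropLast ++ ['C']) false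
    else pvBgo rest (if c = ' ' then out else out ++ [c]) (c == 'A')

-- recursive characterisation of the non-overlapping left-to-right replace('AB','C')
def pvRep : List Char → List Char
  | [] => []
  | [c] => [c]
  | c :: d :: t => if c = 'A' ∧ d = 'B' then 'C' :: pvRep t else c :: pvRep (d :: t)


-- str.replace(' ','') is exactly "drop all spaces"
lemma pvGoSpace : ∀ (fuel : Nat) (l acc : List Char), l.length ≤ fuel →
  PySem.Chars.replace.go [' '] [] fuel l acc = acc.reverse ++ l.filter (fun c => !(c == ' ')) := by
  intro fuel
  induction fuel with
  | zero =>
    intro l acc h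
    have : l = [] := by cases l <;> simp_all
    subst this; simp [PySem.Chars.replace.go]
  | succ n ih =>
    intro l acc h
    cases l with
    | nil => simp [PySem.Chars.replace.go]
    | cons c t =>
      rw [PySem.Chars.replace.go]
      by_cases hc : c = ' '
      · subst hc
        simp [List.isPrefixOf, ih t acc (by simpa using Nat.le_of_succ_le_succ h)]
      · simp [List.isPrefixOf, hc, ih t (c :: acc) (by simpa using Nat.le_of_succ_le_succ h)]
        simp [Ne.symm hc]

lemma pvReplaceSpace (s : List Char) :
    PySem.Chars.replace s [' '] [] = s.filter (fun c => !(c == ' ')) := by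
  unfold PySem.Chars.replace
  simpa using pvGoSpace s.length s [] (le_refl _)

-- the loop invariant: A's string is (processed prefix ++ untouched suffix); dropping the
-- spaces of the processed prefix gives B's accumulated output, and A's flg matches B's prevA
-- (flg = true forces the processed prefix to end in a literal 'A').
lemma pvMain : ∀ (rest pre out : List Char) (f : Bool),
    pre.filter (fun c => !(c == ' ')) = out →
    (f = true → ∃ p, pre = p ++ ['A']) →
    (((PySem.List.pyRange (pre.length : Int) ((pre.length : Int) + (rest.length : Int)) 1).foldl
        pvAstep (pre ++ rest, f)).1).filter (fun c => !(c == ' '))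
      = pvBgo rest out f := by
  intro rest
  induction rest with
  | nil =>
    intro pre out f h1 _
    rw [show ((pre.length : Int) + (([] : List Char).length : Int)) = (pre.length : Int) by simp]
    rw [PySem.List.pyRange_one_eq_nil (le_refl _)]
    simpa [pvBgo] using h1
  | cons c t ih =>
    intro pre out f h1 h2
    have hlt : (pre.length : Int) < (pre.length : Int) + ((c :: t).length : Int) := by
      simp only [List.length_cons]; push_cast; omega
    rw [PySem.List.pyRange_one_cons hlt, List.foldl_cons]
    have hkey : PySem.List.pyGetD (pre ++ c :: t) (pre.length : Int) ' ' = c := by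
      simp [PySem.List.pyGetD_natCast, List.getD]
    by_cases hA : c = 'A'
    · -- key == 'A'
      subst hA
      have hstep : pvAstep (pre ++ 'A' :: t, f) (pre.length : Int) = ((pre ++ ['A']) ++ t, true) := by
        simp [pvAstep, hkey]
      rw [hstep]
      have e1 : (pre.length : Int) + 1 = (((pre ++ ['A']).length : Nat) : Int) := by simp
      have e2 : (pre.length : Int) + (('A' :: t).length : Int)
          = (((pre ++ ['A']).length : Nat) : Int) + (t.length : Int) := by simp; omega
      rw [e2, e1, ih (pre ++ ['A']) (out ++ ['A']) true
        (by simp [h1]) (fun _ => ⟨pre, rfl⟩)]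
      simp [pvBgo]
    · by_cases hB : c = 'B'
      · subst hB
        by_cases hf : f = true
        · -- the merge: previous char is an 'A'
          obtain ⟨p, rfl⟩ := h2 hf
          subst hf
          have hstep : pvAstep ((p ++ ['A']) ++ 'B' :: t, true) (((p ++ ['A']).length : Nat) : Int)
              = ((p ++ ['C', ' ']) ++ t, false) := by
            have hk : PySem.List.pyGetD ((p ++ ['A']) ++ 'B' :: t) (((p ++ ['A']).length : Nat) : Int) ' ' = 'B' := hkey
            -- str1[:i-1] = p
            have htake : PySem.List.slice ((p ++ ['A']) ++ 'B' :: t) none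
                (some ((((p ++ ['A']).length : Nat) : Int) - 1)) = p := by
              have hb : (((p ++ ['A']).length : Nat) : Int) - 1 = ((p.length : Nat) : Int) := by
                simp only [List.length_append, List.length_cons, List.length_nil]; push_cast; omega
              rw [hb, PySem.List.slice_to_natCast,
                show (p ++ ['A']) ++ 'B' :: t = p ++ ('A' :: 'B' :: t) by simp, List.take_left]
            -- str1[i+1:] = t
            have hdrop : PySem.List.slice ((p ++ ['A']) ++ 'B' :: t)
                (some ((((p ++ ['A']).length : Nat) : Int) + 1)) none = t := by
              have hb : (((p ++ ['A']).length : Nat) : Int) + 1 = (((p ++ ['A', 'B']).length : Nat) : Int) := by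
                simp only [List.length_append, List.length_cons, List.length_nil]; push_cast; omega
              rw [hb, PySem.List.slice_from_natCast,
                show (p ++ ['A']) ++ 'B' :: t = (p ++ ['A', 'B']) ++ t by simp, List.drop_left]
            simp only [pvAstep, hk]
            rw [htake, hdrop]
            simp
          rw [hstep]
          have e1 : (((p ++ ['A']).length : Nat) : Int) + 1 = (((p ++ ['C', ' ']).length : Nat) : Int) := by
            simp only [List.length_append, List.length_cons, List.length_nil]; push_cast; omega
          have e2 : (((p ++ ['A']).length : Nat) : Int) + (('B' :: t).length : Int)
              = (((p ++ ['C', ' ']).length : Nat) : Int) + (t.length : Int) := by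
            simp only [List.length_append, List.length_cons, List.length_nil]; push_cast; omega
          have hout : out = p.filter (fun c => !(c == ' ')) ++ ['A'] := by
            rw [← h1]; simp
          rw [e2, e1, ih (p ++ ['C', ' ']) (out.dropLast ++ ['C']) false
            (by simp [hout]) (by simp)]
          simp [pvBgo]
        · -- flg is False: nothing happens
          have hf' : f = false := by cases f <;> simp_all
          subst hf'
          have hstep : pvAstep (pre ++ 'B' :: t, false) (pre.length : Int) = ((pre ++ ['B']) ++ t, false) := by
            simp [pvAstep, hkey]
          rw [hstep]
          have e1 : (pre.length : Int) + 1 = (((pre ++ ['B']).length : Nat) : Int) := by simp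
          have e2 : (pre.length : Int) + (('B' :: t).length : Int)
              = (((pre ++ ['B']).length : Nat) : Int) + (t.length : Int) := by simp; omega
          rw [e2, e1, ih (pre ++ ['B']) (out ++ ['B']) false (by simp [h1]) (by simp)]
          simp [pvBgo]
      · -- any other character resets the flag
        have hstep : pvAstep (pre ++ c :: t, f) (pre.length : Int) = ((pre ++ [c]) ++ t, false) := by
          simp [pvAstep, hkey, hA, hB]
        rw [hstep]
        have e1 : (pre.length : Int) + 1 = (((pre ++ [c]).length : Nat) : Int) := by simp
        have e2 : (pre.length : Int) + ((c :: t).length : Int)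
            = (((pre ++ [c]).length : Nat) : Int) + (t.length : Int) := by simp; omega
        rw [e2, e1, ih (pre ++ [c]) (if c = ' ' then out else out ++ [c]) false
          (by by_cases hc : c = ' ' <;> simp [hc, h1]) (by simp)]
        have hcA : (c == 'A') = false := by simp [hA]
        simp [pvBgo, hB, hcA]


-- str.replace('AB','C') computes pvRep
lemma pvGoAB : ∀ (fuel : Nat) (l acc : List Char), l.length ≤ fuel →
    PySem.Chars.replace.go ['A', 'B'] ['C'] fuel l acc = acc.reverse ++ pvRep l := by
  intro fuel
  induction fuel with
  | zero =>
    intro l acc h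
    have : l = [] := by cases l <;> simp_all
    subst this; simp [PySem.Chars.replace.go, pvRep]
  | succ n ih =>
    intro l acc h
    cases l with
    | nil => simp [PySem.Chars.replace.go, pvRep]
    | cons c t =>
      rw [PySem.Chars.replace.go]
      cases t with
      | nil =>
        have hp : List.isPrefixOf ['A', 'B'] [c] = false := by
          simp [List.isPrefixOf]
        rw [hp]
        simp only [Bool.false_eq_true, if_false]
        rw [ih [] (c :: acc) (by simp)]
        simp [pvRep]
      | cons d t' =>
        by_cases hcd : c = 'A' ∧ d = 'B'
        · obtain ⟨rfl, rfl⟩ := hcd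
          have hp : List.isPrefixOf ['A', 'B'] ('A' :: 'B' :: t') = true := by
            simp [List.isPrefixOf]
          rw [hp]
          simp only [if_true]
          have hlen : t'.length ≤ n := by simp at h; omega
          rw [show List.drop (['A', 'B'] : List Char).length ('A' :: 'B' :: t') = t' from rfl]
          rw [show (['C'] : List Char).reverse ++ acc = 'C' :: acc from rfl]
          rw [ih t' ('C' :: acc) hlen]
          simp [pvRep]
        · have hp : List.isPrefixOf ['A', 'B'] (c :: d :: t') = false := by
            simp [List.isPrefixOf]
            intro h1 h2; exact hcd ⟨h1.symm, h2.symm⟩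
          rw [hp]
          simp only [Bool.false_eq_true, if_false]
          rw [ih (d :: t') (c :: acc) (by simp at h ⊢; omega)]
          rw [pvRep]
          simp [hcd]

lemma pvReplaceAB (s : List Char) :
    PySem.Chars.replace s ['A', 'B'] ['C'] = pvRep s := by
  unfold PySem.Chars.replace
  simpa using pvGoAB s.length s [] (le_refl _)

-- the single pass pvBgo computes "replace AB by C, then drop the spaces"
lemma pvBridge : ∀ (l q : List Char),
    pvBgo l q false = q ++ (pvRep l).filter (fun c => !(c == ' ')) ∧
    pvBgo l (q ++ ['A']) true = q ++ (pvRep ('A' :: l)).filter (fun c => !(c == ' ')) := by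
  intro l
  induction l with
  | nil => intro q; constructor <;> simp [pvBgo, pvRep]
  | cons c t ih =>
    intro q
    constructor
    · -- prevA = false
      rw [pvBgo]
      simp only [and_false, Bool.false_eq_true, if_false]
      by_cases hc : c = 'A'
      · subst hc
        rw [show (('A' : Char) == 'A') = true from rfl]
        rw [show (if ('A' : Char) = ' ' then q else q ++ ['A']) = q ++ ['A'] from rfl]
        exact (ih q).2
      · have hc' : (c == 'A') = false := by simp [hc]
        rw [hc', (ih _).1]
        cases t with
        | nil => by_cases hsp : c = ' ' <;> simp [pvRep, hsp]
        | cons d t' =>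
          rw [show pvRep (c :: d :: t') = c :: pvRep (d :: t') by rw [pvRep]; simp [hc]]
          by_cases hsp : c = ' ' <;> simp [hsp]
    · -- prevA = true, out ends with the pending 'A'
      rw [pvBgo]
      by_cases hb : c = 'B'
      · subst hb
        rw [if_pos ⟨rfl, rfl⟩]
        rw [show (q ++ ['A']).dropLast ++ ['C'] = q ++ ['C'] by simp]
        rw [(ih (q ++ ['C'])).1]
        rw [show pvRep ('A' :: 'B' :: t) = 'C' :: pvRep t by rw [pvRep]; simp]
        simp
      · rw [show pvRep ('A' :: c :: t) = 'A' :: pvRep (c :: t) by rw [pvRep]; simp [hb]]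
        rw [if_neg (by simp [hb])]
        by_cases hc : c = 'A'
        · subst hc
          rw [show (('A' : Char) == 'A') = true from rfl]
          rw [show (if ('A' : Char) = ' ' then q ++ ['A'] else (q ++ ['A']) ++ ['A'])
              = (q ++ ['A']) ++ ['A'] from rfl]
          rw [(ih (q ++ ['A'])).2]
          simp
        · have hc' : (c == 'A') = false := by simp [hc]
          rw [hc', (ih _).1]
          cases t with
          | nil => by_cases hsp : c = ' ' <;> simp [pvRep, hsp]
          | cons d t' =>
            rw [show pvRep (c :: d :: t') = c :: pvRep (d :: t') by rw [pvRep]; simp [hc]]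
            by_cases hsp : c = ' ' <;> simp [hsp]

-- ===== VERDICT (by name: the statement is the Claim_ definition above) =====
theorem ReplaceOccurencesOfStringNoExtraSpace_spec : Claim_equal_ReplaceOccurencesOfStringNoExtraSpace := by
  intro str1 _
  unfold Spec_ReplaceOccurencesOfStringNoExtraSpace
  unfold ReplaceOccurencesOfStringNoExtraSpace ReplaceOccurencesOfStringNoExtraSpace_alt
  apply String.toList_inj.mp
  rw [PySem.Str.toList_replace, PySem.Str.toList_replace, PySem.Str.toList_replace]
  simp only [String.toList_ofList]
  rw [show (" " : String).toList = [' '] from rfl, show ("" : String).toList = [] from rfl,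
    show ("AB" : String).toList = ['A', 'B'] from rfl, show ("C" : String).toList = ['C'] from rfl]
  rw [pvReplaceSpace, pvReplaceSpace, pvReplaceAB]
  have hm := pvMain str1.toList [] [] false (by simp) (by simp)
  have hb := (pvBridge str1.toList []).1
  simp only [List.nil_append] at hb
  rw [hb] at hm
  simpa [PySem.Str.len_eq] using hm
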